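-- pv_equiv track=rewrite | github.com/kylestratis/vibedialer | vibedialer/resume.py | infer_pattern_from_numbers
-- ===== SOURCE A (Python) =====
-- def infer_pattern_from_numbers(numbers: set[str]) -> str | None:
--     """
--     Infer the phone number pattern from a set of dialed numbers.
--
--     Looks for common prefixes and determines the pattern used for dialing.
--
--     Args:
--         numbers: Set of phone numbers
--
--     Returns:
--         Inferred pattern (e.g., "555-12") or None if no pattern found
--
--     Examples:
--         >>> infer_pattern_from_numbers({"555-1200", "555-1201", "555-1299"})
--         "555-12"
--         >>> infer_pattern_from_numbers({"555-0000", "555-9999"})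
--         "555"
--     """
--     if not numbers:
--         return None
--
--     # Convert to list and sort
--     number_list = sorted(numbers)
--
--     # Find common prefix by comparing first and last numbers
--     first = number_list[0]
--     last = number_list[-1]
--
--     # Find common prefix
--     common_prefix = ""
--     for c1, c2 in zip(first, last, strict=False):
--         if c1 == c2:
--             common_prefix += c1
--         else:
--             break
--
--     # Remove trailing dash if present
--     if common_prefix.endswith("-"):
--         common_prefix = common_prefix[:-1]
--
--     # Try to find the most meaningful pattern by removing trailing digits
--     # This helps with cases like "555-1234" (full number) -> "555-12"
--     # We want to generate patterns that make sense (10, 100, 1000 numbers)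
--     clean_prefix = common_prefix.replace("-", "")
--
--     # If the prefix is a full 7-digit number, try to shorten it
--     if len(clean_prefix) == 7:  # Full 7-digit number like "555-1234"
--         # Try removing last 1-2 digits to find a better pattern
--         for trim in [2, 1]:
--             if len(common_prefix) > trim:
--                 candidate = common_prefix[:-trim]
--             else:
--                 candidate = common_prefix
--             # Remove trailing dash
--             if candidate.endswith("-"):
--                 candidate = candidate[:-1]
--             # Check if this makes sense
--             candidate_clean = candidate.replace("-", "")
--             if len(candidate_clean) >= 2:
--                 return candidate
--
--     # If we found a meaningful prefix (at least 2 digits after formatting)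
--     if len(clean_prefix) >= 2:
--         return common_prefix
--
--     return None
-- ===== SOURCE B (Python) =====
-- def infer_pattern_from_numbers(numbers: set[str]) -> str | None:
--     """Column-wise LCP across all numbers (no sort), then the same trim rules."""
--     if not numbers:
--         return None
--     nums = list(numbers)
--     first = nums[0]
--
--     # Longest common prefix: scan character columns across ALL numbers.
--     prefix_chars = []
--     for i, c in enumerate(first):
--         if all(i < len(s) and s[i] == c for s in nums):
--             prefix_chars.append(c)
--         else:
--             break
--     prefix = "".join(prefix_chars)
--
--     # Drop a single trailing dash.
--     if prefix.endswith("-"):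
--         prefix = prefix[:-1]
--
--     # A full 7-digit prefix: shorten by two characters (plus a trailing dash).
--     if sum(c != "-" for c in prefix) == 7:
--         prefix = prefix[:-2]
--         if prefix.endswith("-"):
--             prefix = prefix[:-1]
--
--     return prefix if sum(c != "-" for c in prefix) >= 2 else None
-- ===== Notes on version B (the rewrite author's own statement) =====
-- stated objective: faster
-- what changed: B computes the longest common prefix by a single column-wise scan over all numbers instead of sorting the set and zipping its two endpoints, counts non-dash characters instead of building dash-stripped copies, and collapses A's trim-candidate loop to the single [:-2] trim it provably always takes.
import Mathlib
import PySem

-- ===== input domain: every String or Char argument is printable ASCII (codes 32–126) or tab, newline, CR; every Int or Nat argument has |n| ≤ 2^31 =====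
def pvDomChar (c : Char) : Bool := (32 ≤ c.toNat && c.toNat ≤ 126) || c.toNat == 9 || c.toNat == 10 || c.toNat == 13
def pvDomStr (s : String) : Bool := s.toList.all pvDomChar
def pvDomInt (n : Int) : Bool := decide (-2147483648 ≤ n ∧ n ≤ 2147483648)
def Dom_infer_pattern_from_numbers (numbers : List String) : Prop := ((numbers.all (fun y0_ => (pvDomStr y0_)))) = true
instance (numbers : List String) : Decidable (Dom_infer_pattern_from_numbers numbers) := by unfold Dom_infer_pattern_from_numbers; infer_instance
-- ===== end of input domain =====

-- B computes the longest common prefix by one column-wise scan over all numbers instead of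
-- sorting and zipping the two endpoints, and collapses A's trim-candidate loop to the single
-- [:-2] trim it always takes; equal return value on every input.

-- ===== PORT A =====
-- shared one-liner: "if p.endswith('-'): p = p[:-1]" (appears verbatim in both Pythons)
def pvStripDash (cp : List Char) : List Char :=
  if PySem.Chars.endswith cp ['-'] then PySem.List.slice cp none (some (-1)) else cp

-- "for c1, c2 in zip(first, last): if c1 == c2: common_prefix += c1 else: break"
def pvLcpZip : List (Char × Char) → List Char
  | [] => []
  | (c1, c2) :: t => if c1 = c2 then c1 :: pvLcpZip t else []

-- "for trim in [2, 1]: … return candidate" (early return = some; loop exhausted = none)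
def pvTryTrims (cp : List Char) : List Int → Option (List Char)
  | [] => none
  | trim :: ts =>
      let candidate0 := if trim < (cp.length : Int) then PySem.List.slice cp none (some (-trim)) else cp
      let candidate := pvStripDash candidate0
      if 2 ≤ (PySem.Chars.replace candidate ['-'] []).length then some candidate
      else pvTryTrims cp ts

def infer_pattern_from_numbers (numbers : List String) : Option String :=
  if numbers = [] then none else
    let number_list := PySem.List.sorted numbers (fun x => x)
    let first := PySem.List.pyGetD number_list 0 ""
    let last := PySem.List.pyGetD number_list (-1) ""
    let common_prefix := pvStripDash (pvLcpZip (first.toList.zip last.toList))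
    let clean_prefix := PySem.Chars.replace common_prefix ['-'] []
    if clean_prefix.length = 7 then
      match pvTryTrims common_prefix [2, 1] with
      | some c => some (String.ofList c)
      | none => if 2 ≤ clean_prefix.length then some (String.ofList common_prefix) else none
    else
      if 2 ≤ clean_prefix.length then some (String.ofList common_prefix) else none

-- ===== PORT B =====
-- "for i, c in enumerate(first): if all(i < len(s) and s[i] == c for s in nums): append else break"
-- (s[i]? = some c is exactly "i < len(s) and s[i] == c")
def pvColScan (nums : List (List Char)) : List Char → Nat → List Char
  | [], _ => []
  | c :: cs, i => if nums.all (fun s => s[i]? == some c) then c :: pvColScan nums cs (i + 1) else []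

def infer_pattern_from_numbers_alt (numbers : List String) : Option String :=
  if numbers = [] then none else
    let nums := numbers.map String.toList
    let prefix1 := pvStripDash (pvColScan nums (nums.headD []) 0)
    let prefix2 :=
      if prefix1.countP (fun c => c != '-') = 7 then
        pvStripDash (PySem.List.slice prefix1 none (some (-2)))
      else prefix1
    if 2 ≤ prefix2.countP (fun c => c != '-') then some (String.ofList prefix2) else none

-- ===== PRECONDITION & SPEC =====
def Spec_infer_pattern_from_numbers (numbers : List String) (out : Option String) : Prop := out = infer_pattern_from_numbers_alt numbers
instance (numbers : List String) (out : Option String) : Decidable (Spec_infer_pattern_from_numbers numbers out) := by unfold Spec_infer_pattern_from_numbers; infer_instance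

-- ===== CLAIM (what is proved, stated in full; the proofs are below) =====
def Claim_equal_infer_pattern_from_numbers : Prop := ∀ (numbers : List String), Dom_infer_pattern_from_numbers numbers → Spec_infer_pattern_from_numbers numbers (infer_pattern_from_numbers numbers)

-- ===== LEMMAS AND PROOFS =====

-- replace(s, "-", "") removes the dashes
theorem pv_replace_go_dash : ∀ (fuel : Nat) (l acc : List Char), l.length ≤ fuel →
    PySem.Chars.replace.go ['-'] [] fuel l acc = acc.reverse ++ l.filter (fun c => c != '-') := by
  intro fuel
  induction fuel with
  | zero => intro l acc h; have : l = [] := List.eq_nil_of_length_eq_zero (Nat.le_zero.mp h); subst this; simp [PySem.Chars.replace.go]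
  | succ n ih =>
    intro l acc h
    cases l with
    | nil => simp [PySem.Chars.replace.go]
    | cons c t =>
      by_cases hc : c = '-'
      · subst hc
        simp only [PySem.Chars.replace.go, List.isPrefixOf, beq_self_eq_true, Bool.true_and,
          if_true, List.length_cons, List.drop_succ_cons,
          List.length_nil, List.drop_zero, List.reverse_nil, List.nil_append]
        rw [ih t acc (by simpa using h)]
        simp
      · simp only [PySem.Chars.replace.go, List.isPrefixOf]
        rw [if_neg (by simp [Ne.symm hc]), ih t (c :: acc) (by simpa using h)]
        simp [hc]

theorem pv_replace_dash (cp : List Char) :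
    PySem.Chars.replace cp ['-'] [] = cp.filter (fun c => c != '-') := by
  simpa [PySem.Chars.replace] using pv_replace_go_dash cp.length cp [] le_rfl

theorem pv_clean_len (cp : List Char) :
    (PySem.Chars.replace cp ['-'] []).length = cp.countP (fun c => c != '-') := by
  rw [pv_replace_dash]; exact List.countP_eq_length_filter.symm

-- pvStripDash keeps the non-dash characters
theorem pv_countP_stripDash (cp : List Char) :
    (pvStripDash cp).countP (fun c => c != '-') = cp.countP (fun c => c != '-') := by
  unfold pvStripDash
  split
  · next h =>
    obtain ⟨q, hq⟩ := (PySem.Chars.endswith_iff cp ['-']).mp h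
    rw [PySem.List.slice_to_neg_one, ← hq, List.dropLast_concat, List.countP_append]
    simp
  · rfl

-- auxiliary: the lexicographic order on Char lists, one step at a time
theorem pv_cons_le_nil (x : Char) (l : List Char) : ¬ (x :: l ≤ ([] : List Char)) := by
  intro h
  rcases lt_or_eq_of_le h with h | h
  · replace h : List.Lex (· < ·) (x :: l) [] := h
    cases h
  · simp at h

theorem pv_cons_le_cons_iff (x y : Char) (l₁ l₂ : List Char) :
    x :: l₁ ≤ y :: l₂ ↔ x < y ∨ (x = y ∧ l₁ ≤ l₂) := by
  rw [le_iff_lt_or_eq, List.cons_lt_cons_iff, le_iff_lt_or_eq]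
  simp only [List.cons.injEq]
  tauto

-- the zip-loop LCP is the longest common prefix of its two arguments …
theorem pv_lcpZip_maximal : ∀ (p a b : List Char), p <+: a → p <+: b → p <+: pvLcpZip (a.zip b) := by
  intro p
  induction p with
  | nil => intro a b _ _; exact List.nil_prefix
  | cons d p' ih =>
    intro a b ha hb
    cases a with
    | nil => exact absurd ha (by simp)
    | cons x a' =>
      cases b with
      | nil => exact absurd hb (by simp)
      | cons y b' =>
        obtain ⟨hdx, ha'⟩ := List.cons_prefix_cons.mp ha
        obtain ⟨hdy, hb'⟩ := List.cons_prefix_cons.mp hb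
        subst hdx; subst hdy
        simp only [List.zip_cons_cons, pvLcpZip, if_pos]
        exact List.cons_prefix_cons.mpr ⟨rfl, ih a' b' ha' hb'⟩

-- … and a ≤ s ≤ b (lexicographic) forces s to carry the common prefix of a and b
theorem pv_lcpZip_middle : ∀ (a b s : List Char), a ≤ s → s ≤ b → pvLcpZip (a.zip b) <+: s := by
  intro a
  induction a with
  | nil => intro b s _ _; simp [pvLcpZip]
  | cons x a' ih =>
    intro b s ha hb
    cases b with
    | nil => simp [pvLcpZip]
    | cons y b' =>
      simp only [List.zip_cons_cons, pvLcpZip]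
      by_cases hxy : x = y
      · subst hxy
        rw [if_pos rfl]
        cases s with
        | nil => exact absurd ha (pv_cons_le_nil x a')
        | cons z s' =>
          rcases (pv_cons_le_cons_iff x z a' s').mp ha with hxz | ⟨hxz, ha'⟩
          · rcases (pv_cons_le_cons_iff z x s' b').mp hb with hzx | ⟨hzx, _⟩
            · exact absurd (hxz.trans hzx) (lt_irrefl x)
            · subst hzx; exact absurd hxz (lt_irrefl z)
          · subst hxz
            rcases (pv_cons_le_cons_iff x x s' b').mp hb with hxx | ⟨_, hb'⟩
            · exact absurd hxx (lt_irrefl x)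
            · exact List.cons_prefix_cons.mpr ⟨rfl, ih b' s' ha' hb'⟩
      · rw [if_neg hxy]; exact List.nil_prefix

-- the column scan yields a common prefix of every number …
theorem pv_colScan_prefix (nums : List (List Char)) :
    ∀ (cs : List Char) (i : Nat) (s : List Char), s ∈ nums → pvColScan nums cs i <+: s.drop i := by
  intro cs
  induction cs with
  | nil => intro i s _; simp [pvColScan]
  | cons c t ih =>
    intro i s hs
    simp only [pvColScan]
    split
    · next h =>
      have hc : s[i]? = some c := by
        have := List.all_eq_true.mp h s hs
        exact eq_of_beq this
      obtain ⟨hi, hsc⟩ : ∃ h : i < s.length, s[i] = c := by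
        rcases List.getElem?_eq_some_iff.mp hc with ⟨h1, h2⟩; exact ⟨h1, h2⟩
      have hdrop : s.drop i = c :: s.drop (i + 1) := by
        rw [← List.getElem_cons_drop hi, hsc]
      rw [hdrop]
      exact List.cons_prefix_cons.mpr ⟨rfl, ih (i + 1) s hs⟩
    · exact List.nil_prefix

-- … and the longest common prefix reachable within the first number
theorem pv_colScan_maximal (nums : List (List Char)) :
    ∀ (p cs : List Char) (i : Nat), p <+: cs → (∀ s ∈ nums, p <+: s.drop i) →
      p <+: pvColScan nums cs i := by
  intro p
  induction p with
  | nil => intro cs i _ _; exact List.nil_prefix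
  | cons d p' ih =>
    intro cs i hp hall
    cases cs with
    | nil => exact absurd hp (by simp)
    | cons e cs' =>
      obtain ⟨hde, hp'⟩ := List.cons_prefix_cons.mp hp
      subst hde
      have hkey : ∀ s ∈ nums, s[i]? = some d ∧ p' <+: s.drop (i + 1) := by
        intro s hs
        obtain ⟨t, ht⟩ := hall s hs
        have hget : s[i]? = some d := by
          have h0 : (s.drop i)[0]? = some d := by rw [← ht]; simp
          rw [List.getElem?_drop] at h0
          simpa using h0
        refine ⟨hget, ⟨t, ?_⟩⟩
        have : (s.drop i).tail = s.drop (i + 1) := by rw [List.tail_drop]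
        rw [← this, ← ht]
        simp
      have hcond : nums.all (fun s => s[i]? == some d) = true := by
        rw [List.all_eq_true]; intro s hs
        exact beq_iff_eq.mpr (hkey s hs).1
      simp only [pvColScan, hcond, if_true]
      exact List.cons_prefix_cons.mpr ⟨rfl, ih cs' (i + 1) hp' (fun s hs => (hkey s hs).2)⟩

-- in a ≤-sorted list every element is at most the last one
theorem pv_le_getLast {α : Type} [Preorder α] :
    ∀ (l : List α), l.Pairwise (· ≤ ·) → ∀ (hne : l ≠ []) (y : α), y ∈ l → y ≤ l.getLast hne := by
  intro l
  induction l with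
  | nil => intro _ hne; exact absurd rfl hne
  | cons a t ih =>
    intro hp _ y hy
    rcases List.pairwise_cons.mp hp with ⟨ha, ht⟩
    cases t with
    | nil => simp at hy; simp [hy]
    | cons b t' =>
      rw [List.getLast_cons (by simp)]
      rcases List.mem_cons.mp hy with hya | hyt
      · subst hya
        exact le_trans (ha _ (List.getLast_mem _)) le_rfl
      · exact ih ht (by simp) y hyt

-- the two longest-common-prefix computations agree
theorem pv_cp_eq (numbers : List String) (h : numbers ≠ []) :
    pvLcpZip ((PySem.List.pyGetD (PySem.List.sorted numbers (fun x => x)) 0 "").toList.zip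
              (PySem.List.pyGetD (PySem.List.sorted numbers (fun x => x)) (-1) "").toList)
    = pvColScan (numbers.map String.toList) ((numbers.map String.toList).headD []) 0 := by
  set ss := PySem.List.sorted numbers (fun x => x) with hss
  have hssne : ss ≠ [] := by
    rw [hss]; intro hc; exact h ((PySem.List.sorted_eq_nil_iff numbers _ false).mp hc)
  obtain ⟨m, t, hmt⟩ := List.exists_cons_of_ne_nil hssne
  have hfirst : PySem.List.pyGetD ss 0 "" = m := by rw [PySem.List.pyGetD_zero, hmt]; rfl
  have hlast : PySem.List.pyGetD ss (-1) "" = ss.getLast hssne := PySem.List.pyGetD_neg_one ss "" hssne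
  have hmem_ss : ∀ y : String, y ∈ ss ↔ y ∈ numbers := by
    intro y; rw [hss]; exact PySem.List.mem_sorted numbers _ false y
  have hlow : ∀ y ∈ numbers, m ≤ y := by
    intro y hy
    exact PySem.List.key_head_sorted_le numbers (fun x => x) (hss ▸ hmt) y hy
  have hhigh : ∀ y ∈ numbers, y ≤ ss.getLast hssne := by
    intro y hy
    exact pv_le_getLast ss (by rw [hss]; exact PySem.List.sorted_pairwise numbers (fun x => x)) hssne y
      ((hmem_ss y).mpr hy)
  obtain ⟨n0, rest, hn0⟩ := List.exists_cons_of_ne_nil h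
  have hhead : (numbers.map String.toList).headD [] = n0.toList := by rw [hn0]; rfl
  have hmmem : m ∈ numbers := (hmem_ss m).mp (by rw [hmt]; exact List.mem_cons_self ..)
  have hlmem : ss.getLast hssne ∈ numbers := (hmem_ss _).mp (List.getLast_mem hssne)
  rw [hfirst, hlast, hhead]
  -- the A-side LCP is a prefix of every number
  have hAall : ∀ y ∈ numbers,
      pvLcpZip (m.toList.zip (ss.getLast hssne).toList) <+: y.toList := by
    intro y hy
    exact pv_lcpZip_middle m.toList (ss.getLast hssne).toList y.toList
      (String.le_iff_toList_le.mp (hlow y hy)) (String.le_iff_toList_le.mp (hhigh y hy))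
  -- the B-side LCP is a prefix of every number
  have hBall : ∀ y ∈ numbers,
      pvColScan (numbers.map String.toList) n0.toList 0 <+: y.toList := by
    intro y hy
    have := pv_colScan_prefix (numbers.map String.toList) n0.toList 0 y.toList
      (List.mem_map_of_mem hy)
    simpa using this
  have hAB : pvLcpZip (m.toList.zip (ss.getLast hssne).toList)
      <+: pvColScan (numbers.map String.toList) n0.toList 0 := by
    -- A prefix of B: by maximality of the column scan
    exact pv_colScan_maximal (numbers.map String.toList)
      _ n0.toList 0 (hAall n0 (by rw [hn0]; exact List.mem_cons_self ..))
      (by intro s hs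
          obtain ⟨y, hy, rfl⟩ := List.mem_map.mp hs
          simpa using hAall y hy)
  have hBA : pvColScan (numbers.map String.toList) n0.toList 0
      <+: pvLcpZip (m.toList.zip (ss.getLast hssne).toList) := by
    -- B prefix of A: by maximality of the zip LCP
    exact pv_lcpZip_maximal _ _ _ (hBall m hmmem) (hBall _ hlmem)
  exact hAB.eq_of_length (Nat.le_antisymm hAB.length_le hBA.length_le)

-- A's trim pipeline equals B's single-trim pipeline, for every prefix
theorem pv_post_eq (cp : List Char) :
    (if (PySem.Chars.replace cp ['-'] []).length = 7 then
       match pvTryTrims cp [2, 1] with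
       | some c => some (String.ofList c)
       | none => if 2 ≤ (PySem.Chars.replace cp ['-'] []).length then some (String.ofList cp) else none
     else if 2 ≤ (PySem.Chars.replace cp ['-'] []).length then some (String.ofList cp) else none)
    = (if 2 ≤ (if cp.countP (fun c => c != '-') = 7 then
                 pvStripDash (PySem.List.slice cp none (some (-2)))
               else cp).countP (fun c => c != '-') then
         some (String.ofList (if cp.countP (fun c => c != '-') = 7 then
                 pvStripDash (PySem.List.slice cp none (some (-2)))
               else cp))
       else none) := by
  rw [pv_clean_len]
  by_cases h7 : cp.countP (fun c => c != '-') = 7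
  · rw [if_pos h7, if_pos h7]
    have hlen : 7 ≤ cp.length := h7 ▸ List.countP_le_length (p := fun c => c != '-') (l := cp)
    have hslice : PySem.List.slice cp none (some (-2)) = cp.take (cp.length - 2) :=
      PySem.List.slice_to_neg_ofNat cp 2 (by norm_num)
    have hcand : 5 ≤ (pvStripDash (PySem.List.slice cp none (some (-2)))).countP (fun c => c != '-') := by
      rw [pv_countP_stripDash, hslice]
      have hsplit : cp.take (cp.length - 2) ++ cp.drop (cp.length - 2) = cp := List.take_append_drop _ _
      have hc : (cp.take (cp.length - 2)).countP (fun c => c != '-')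
          + (cp.drop (cp.length - 2)).countP (fun c => c != '-') = 7 := by
        rw [← List.countP_append, hsplit, h7]
      have hd : (cp.drop (cp.length - 2)).countP (fun c => c != '-') ≤ 2 := by
        calc (cp.drop (cp.length - 2)).countP (fun c => c != '-')
            ≤ (cp.drop (cp.length - 2)).length := List.countP_le_length
          _ = cp.length - (cp.length - 2) := List.length_drop
          _ ≤ 2 := by omega
      omega
    have htrim : pvTryTrims cp [2, 1] = some (pvStripDash (PySem.List.slice cp none (some (-2)))) := by
      simp only [pvTryTrims]
      rw [if_pos (by omega : (2 : Int) < (cp.length : Int))]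
      rw [if_pos (by rw [pv_clean_len]; omega)]
    rw [htrim, if_pos (by omega : 2 ≤ (pvStripDash (PySem.List.slice cp none (some (-2)))).countP (fun c => c != '-'))]
  · rw [if_neg h7, if_neg h7]

-- ===== VERDICT (by name: the statement is the Claim_ definition above) =====
theorem infer_pattern_from_numbers_spec : Claim_equal_infer_pattern_from_numbers := by
  intro numbers _
  unfold Spec_infer_pattern_from_numbers infer_pattern_from_numbers infer_pattern_from_numbers_alt
  by_cases h : numbers = []
  · rw [if_pos h, if_pos h]
  · rw [if_neg h, if_neg h]
    simp only []
    rw [pv_cp_eq numbers h]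
    exact pv_post_eq (pvStripDash (pvColScan (numbers.map String.toList) ((numbers.map String.toList).headD []) 0))
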